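-- pv_equiv track=rewrite | github.com/Vl4dk0/gnn | utils/graph_utils.py | moore_bound
-- ===== SOURCE A (Python) =====
-- def moore_bound(k, g):
--     """
--     Compute the Moore lower bound for the minimum number of vertices
--     in a (k,g)-cage graph.
--
--     Args:
--         k: Degree (must be >= 2)
--         g: Girth (must be >= 3)
--
--     Returns:
--         Minimum number of vertices (Moore bound)
--     """
--     if k < 2 or g < 3:
--         raise ValueError("k must be >= 2 and g must be >= 3")
--
--     if g % 2 == 1:  # Odd girth
--         # N = 1 + k * sum_{i=0}^{(g-3)/2} (k-1)^i
--         sum_term = sum((k - 1) ** i for i in range((g - 3) // 2 + 1))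
--         return 1 + k * sum_term
--     else:  # Even girth
--         # N = 2 * sum_{i=0}^{(g/2) - 1} (k-1)^i
--         sum_term = sum((k - 1) ** i for i in range(g // 2))
--         return 2 * sum_term
-- ===== SOURCE B (Python) =====
-- def moore_bound(k, g):
--     """Moore bound via the closed-form geometric-series sum (no loop)."""
--     if k < 2 or g < 3:
--         raise ValueError("k must be >= 2 and g must be >= 3")
--     odd = g % 2 == 1
--     m = (g - 1) // 2 if odd else g // 2          # number of geometric terms
--     s = m if k == 2 else (pow(k - 1, m) - 1) // (k - 2)
--     return 1 + k * s if odd else 2 * s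
-- ===== Notes on version B (the rewrite author's own statement) =====
-- stated objective: faster
-- what changed: Replaced the O(g) summation loop of powers by the closed-form geometric-series formula ((k-1)^m - 1) // (k - 2) (with the k = 2 count special case), computing one fast power instead of g/2 multiplications-and-additions.
import Mathlib
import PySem

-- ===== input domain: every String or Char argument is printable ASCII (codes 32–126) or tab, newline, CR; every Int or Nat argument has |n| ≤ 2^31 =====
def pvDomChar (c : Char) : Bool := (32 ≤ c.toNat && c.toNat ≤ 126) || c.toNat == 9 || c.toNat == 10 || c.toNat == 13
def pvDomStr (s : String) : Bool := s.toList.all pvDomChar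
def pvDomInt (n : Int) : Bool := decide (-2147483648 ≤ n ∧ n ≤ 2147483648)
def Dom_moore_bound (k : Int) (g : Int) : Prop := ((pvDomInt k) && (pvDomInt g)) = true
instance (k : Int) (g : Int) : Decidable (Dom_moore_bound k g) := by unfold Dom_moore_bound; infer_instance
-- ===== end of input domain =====

-- B replaces A's O(g) loop summing powers of (k-1) by the closed-form geometric series
-- ((k-1)^m - 1) // (k-2) (k = 2 special-cased); objective: faster (asymptotic).

-- ===== PORT A =====
-- literal port of A: the generator-sum over range(...) of (k-1)**i; i ≥ 0 throughout the
-- range, so the exponent i.toNat is exact.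
def moore_bound (k : Int) (g : Int) : Int :=
  if PySem.Int.mod g 2 == 1 then
    let sum_term := (PySem.List.pyRange 0 (PySem.Int.floordiv (g - 3) 2 + 1) 1).foldl
      (fun s i => s + (k - 1) ^ i.toNat) 0
    1 + k * sum_term
  else
    let sum_term := (PySem.List.pyRange 0 (PySem.Int.floordiv g 2) 1).foldl
      (fun s i => s + (k - 1) ^ i.toNat) 0
    2 * sum_term

-- ===== PORT B =====
-- literal port of Source B; pow(k-1, m) with m ≥ 0 is (k-1)^m.toNat (exact for m ≥ 0).
def moore_bound_alt (k : Int) (g : Int) : Int :=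
  let odd := PySem.Int.mod g 2 == 1
  let m := if odd then PySem.Int.floordiv (g - 1) 2 else PySem.Int.floordiv g 2
  let s := if k == 2 then m else PySem.Int.floordiv ((k - 1) ^ m.toNat - 1) (k - 2)
  if odd then 1 + k * s else 2 * s

-- ===== PRECONDITION & SPEC =====
-- A raises ValueError exactly when k < 2 or g < 3; Pre_ excludes those inputs.
def Pre_moore_bound (k : Int) (g : Int) : Prop := 2 ≤ k ∧ 3 ≤ g
instance (k : Int) (g : Int) : Decidable (Pre_moore_bound k g) := by unfold Pre_moore_bound; infer_instance
def pvWitness_moore_bound : Int × Int := (3, 5)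

def Spec_moore_bound (k : Int) (g : Int) (out : Int) : Prop := out = moore_bound_alt k g
instance (k : Int) (g : Int) (out : Int) : Decidable (Spec_moore_bound k g out) := by unfold Spec_moore_bound; infer_instance

-- ===== CLAIM (what is proved, stated in full; the proofs are below) =====
def Claim_equal_moore_bound : Prop := ∀ (k : Int) (g : Int), Dom_moore_bound k g → Pre_moore_bound k g → Spec_moore_bound k g (moore_bound k g)

-- ===== LEMMAS AND PROOFS =====

-- A's summation loop over range(0, n) equals the Finset geometric sum.
theorem foldl_geom (x : Int) (n : Nat) :
    (PySem.List.pyRange 0 (n : Int) 1).foldl (fun s i => s + x ^ i.toNat) 0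
      = ∑ i ∈ Finset.range n, x ^ i := by
  induction n with
  | zero => simp [PySem.List.pyRange_one_eq_nil]
  | succ n ih =>
      have h : (((n : Nat) + 1 : Nat) : Int) = (n : Int) + 1 := by push_cast; ring
      rw [h, PySem.List.pyRange_one_succ_right (by positivity), List.foldl_append]
      simp [Finset.sum_range_succ, ih]

-- closed form of the geometric sum as a Python floor-division, for k > 2.
theorem geom_closed (k : Int) (hk : 2 < k) (n : Nat) :
    (∑ i ∈ Finset.range n, (k - 1) ^ i) = PySem.Int.floordiv ((k - 1) ^ n - 1) (k - 2) := by
  have hpos : (0 : Int) < k - 2 := by omega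
  have hmul : (∑ i ∈ Finset.range n, (k - 1) ^ i) * (k - 2) = (k - 1) ^ n - 1 := by
    have := geom_sum_mul (k - 1) n
    calc (∑ i ∈ Finset.range n, (k - 1) ^ i) * (k - 2)
        = (∑ i ∈ Finset.range n, (k - 1) ^ i) * ((k - 1) - 1) := by ring_nf
      _ = (k - 1) ^ n - 1 := by rw [this]
  rw [PySem.Int.floordiv_eq_ediv_of_pos hpos, ← hmul,
    Int.mul_ediv_cancel _ (by omega)]

-- common core: A's loop over range(0, m) equals B's closed form, for any m ≥ 0.
theorem core (k m : Int) (hk : 2 ≤ k) (hm : 0 ≤ m) :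
    (PySem.List.pyRange 0 m 1).foldl (fun s i => s + (k - 1) ^ i.toNat) 0
      = if k == 2 then m else PySem.Int.floordiv ((k - 1) ^ m.toNat - 1) (k - 2) := by
  obtain ⟨n, rfl⟩ := Int.eq_ofNat_of_zero_le hm
  rw [foldl_geom]
  by_cases h2 : k = 2
  · subst h2; simp
  · have hk2 : 2 < k := by omega
    rw [geom_closed k hk2 n]
    simp [h2, Int.toNat_natCast]

theorem moore_bound_spec : Claim_equal_moore_bound := by
  intro k g _ ⟨hk, hg⟩
  unfold Spec_moore_bound moore_bound moore_bound_alt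
  have h2 : PySem.Int.mod g 2 = g % 2 := PySem.Int.mod_eq_emod_of_pos (by omega)
  by_cases hodd : g % 2 = 1
  · have hr : PySem.Int.floordiv (g - 3) 2 + 1 = PySem.Int.floordiv (g - 1) 2 := by
      rw [PySem.Int.floordiv_eq_ediv_of_pos (b := 2) (by omega),
        PySem.Int.floordiv_eq_ediv_of_pos (b := 2) (by omega)]
      omega
    have hm : (0 : Int) ≤ PySem.Int.floordiv (g - 1) 2 := by
      rw [PySem.Int.floordiv_eq_ediv_of_pos (b := 2) (by omega)]; omega
    simp only [h2, hodd, hr, beq_self_eq_true, if_true]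
    rw [core k _ hk hm]
  · have hb : ((g % 2 : Int) == 1) = false := by simp [hodd]
    have hm : (0 : Int) ≤ PySem.Int.floordiv g 2 := by
      rw [PySem.Int.floordiv_eq_ediv_of_pos (b := 2) (by omega)]; omega
    simp only [h2, hb, if_false, Bool.false_eq_true]
    rw [core k _ hk hm]
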